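-- pv_equiv track=rewrite | github.com/ckchengucsd/SO3-Cell | Framework/src/ilp_pnr_function.py | group_the_transistor_path
-- ===== SOURCE A (Python) =====
-- def group_the_transistor_path(paths):
--     grouped_paths = []
--
--     for path in paths:
--         added_to_existing_group = False
--
--         for i, group in enumerate(grouped_paths):
--             existing_transistor_ids = {t[0] for p in group for t in p}
--
--             if any(t[0] in existing_transistor_ids for t in path):
--                 group.append(path)
--                 added_to_existing_group = True
--                 break
--
--         if not added_to_existing_group:
--             grouped_paths.append([path])
--
--     return grouped_paths
-- ===== SOURCE B (Python) =====
-- def group_the_transistor_path(paths):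
--     grouped_paths = []
--     first_group = {}  # transistor id -> smallest index of a group containing it
--
--     for path in paths:
--         ids = [t[0] for t in path]
--         candidates = [first_group[i] for i in ids if i in first_group]
--
--         if candidates:
--             g = min(candidates)
--             grouped_paths[g].append(path)
--         else:
--             g = len(grouped_paths)
--             grouped_paths.append([path])
--
--         for i in ids:
--             if i not in first_group or first_group[i] > g:
--                 first_group[i] = g
--
--     return grouped_paths
-- ===== Notes on version B (the rewrite author's own statement) =====
-- stated objective: faster
-- what changed: Instead of rescanning every existing group and rebuilding its transistor-id set for each new path (A), B maintains one dict mapping each transistor id to the smallest index of a group containing it, so the target group of a path is the minimum of the dict values of its ids.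
-- outside the precondition, e.g. on group_the_transistor_path([[()]]): A returns [[[()]]], B raises IndexError
import Mathlib
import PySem

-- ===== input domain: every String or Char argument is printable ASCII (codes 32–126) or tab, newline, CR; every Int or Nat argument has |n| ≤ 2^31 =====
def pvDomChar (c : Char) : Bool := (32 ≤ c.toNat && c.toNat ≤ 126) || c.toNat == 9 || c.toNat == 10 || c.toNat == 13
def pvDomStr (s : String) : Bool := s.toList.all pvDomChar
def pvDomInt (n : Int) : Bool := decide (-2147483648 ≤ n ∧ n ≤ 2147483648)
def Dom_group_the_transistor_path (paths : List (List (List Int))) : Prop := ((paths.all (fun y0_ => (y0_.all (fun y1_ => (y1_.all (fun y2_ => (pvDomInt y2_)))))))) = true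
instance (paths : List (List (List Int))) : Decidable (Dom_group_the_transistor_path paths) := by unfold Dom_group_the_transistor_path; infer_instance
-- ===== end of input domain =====

-- B replaces A's rescan of all groups per path by a dict id -> smallest group index (faster, asymptotic in a timing run).
-- A mutates the matched group in place (group.append); the equivalence proved is about the return value.


-- t[0]: exact under Pre_ (every transistor list is nonempty)
def pvT0 (t : List Int) : Int := (PySem.List.pyGet? t 0).getD 0

-- ===== PORT A =====
-- {t[0] for p in group for t in p}
def pvGroupIds (group : List (List (List Int))) : PySem.Set Int :=
  PySem.Set.ofList (group.flatMap (fun p => p.map pvT0))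

-- the inner 'for i, group in enumerate(grouped_paths): … break': first group whose id set
-- meets the path's ids gets the path appended; none = no match
def pvTryAdd (path : List (List Int)) : List (List (List (List Int))) → Option (List (List (List (List Int))))
  | [] => none
  | g :: rest =>
    if path.any (fun t => (pvGroupIds g).contains (pvT0 t)) then
      some ((g ++ [path]) :: rest)
    else
      (pvTryAdd path rest).map (g :: ·)

def pvStepA (acc : List (List (List (List Int)))) (path : List (List Int)) : List (List (List (List Int))) :=
  match pvTryAdd path acc with
  | some acc' => acc'
  | none => acc ++ [[path]]

def group_the_transistor_path (paths : List (List (List Int))) : List (List (List (List Int))) :=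
  paths.foldl pvStepA []

-- ===== PORT B =====
-- 'if i not in first_group or first_group[i] > g: first_group[i] = g'
def pvUpd (g : Nat) (d : PySem.Dict Int Nat) (i : Int) : PySem.Dict Int Nat :=
  match d.get? i with
  | none => d.insert i g
  | some v => if g < v then d.insert i g else d

-- one iteration of B's loop; state = (grouped_paths, first_group)
def pvStepB (st : List (List (List (List Int))) × PySem.Dict Int Nat) (path : List (List Int)) :
    List (List (List (List Int))) × PySem.Dict Int Nat :=
  let ids := path.map pvT0
  let cands := ids.filterMap st.2.get?
  match PySem.List.min? cands (fun x => x) with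
  | some g => (st.1.modify g (· ++ [path]), ids.foldl (pvUpd g) st.2)
  | none => (st.1 ++ [[path]], ids.foldl (pvUpd st.1.length) st.2)

def group_the_transistor_path_alt (paths : List (List (List Int))) : List (List (List (List Int))) :=
  (paths.foldl pvStepB ([], PySem.Dict.empty)).1

-- ===== PRECONDITION & SPEC =====
-- Pre_ excludes inputs containing an empty transistor list t: t[0] raises IndexError; B always raises there,
-- A escapes the error only when short-circuit evaluation or an empty grouped_paths happens to skip that t[0].
def Pre_group_the_transistor_path (paths : List (List (List Int))) : Prop :=
  (paths.all (fun p => p.all (fun t => !t.isEmpty))) = true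
instance (paths : List (List (List Int))) : Decidable (Pre_group_the_transistor_path paths) := by
  unfold Pre_group_the_transistor_path; infer_instance

def pvWitness_group_the_transistor_path : List (List (List Int)) :=
  [[[1, 7], [2, 8]], [[3, 9]], [[2, 4], [5, 6]]]

def Spec_group_the_transistor_path (paths : List (List (List Int))) (out : List (List (List (List Int)))) : Prop := out = group_the_transistor_path_alt paths
instance (paths : List (List (List Int))) (out : List (List (List (List Int)))) : Decidable (Spec_group_the_transistor_path paths out) := by unfold Spec_group_the_transistor_path; infer_instance

-- ===== CLAIM (what is proved, stated in full; the proofs are below) =====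
def Claim_equal_group_the_transistor_path : Prop := ∀ (paths : List (List (List Int))), Dom_group_the_transistor_path paths → Pre_group_the_transistor_path paths → Spec_group_the_transistor_path paths (group_the_transistor_path paths)

-- ===== LEMMAS AND PROOFS =====

-- index of the first group containing id i
def pvFirstIdx : List (List (List (List Int))) → Int → Option Nat
  | [], _ => none
  | g :: rest, i =>
    if (pvGroupIds g).contains i then some 0 else (pvFirstIdx rest i).map (· + 1)

-- index of the first group meeting the id list
def pvInterIdx : List (List (List (List Int))) → List Int → Option Nat
  | [], _ => none
  | g :: rest, ids =>
    if ids.any (fun i => (pvGroupIds g).contains i) then some 0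
    else (pvInterIdx rest ids).map (· + 1)

def pvMinOpt (o : Option Nat) (g : Nat) : Option Nat :=
  match o with
  | none => some g
  | some v => some (min v g)

-- the loop invariant tying B's dict to the group list
def pvInv (groups : List (List (List (List Int)))) (d : PySem.Dict Int Nat) : Prop :=
  ∀ i : Int, d.get? i = pvFirstIdx groups i

theorem pvTryAdd_eq (path : List (List Int)) (acc : List (List (List (List Int)))) :
    pvTryAdd path acc = (pvInterIdx acc (path.map pvT0)).map (fun g => acc.modify g (· ++ [path])) := by
  induction acc with
  | nil => rfl
  | cons g rest ih =>
    simp only [pvTryAdd, pvInterIdx, List.any_map, Function.comp_def]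
    split
    · rfl
    · rw [ih]
      cases pvInterIdx rest (path.map pvT0) <;> simp [List.modify]

theorem pvInterIdx_lt (groups : List (List (List (List Int)))) (ids : List Int) (g : Nat)
    (h : pvInterIdx groups ids = some g) : g < groups.length := by
  induction groups generalizing g with
  | nil => simp [pvInterIdx] at h
  | cons x rest ih =>
    simp only [pvInterIdx] at h
    split at h
    · cases h; simp
    · cases hr : pvInterIdx rest ids with
      | none => rw [hr] at h; simp at h
      | some v => rw [hr] at h; cases h; simpa using Nat.succ_lt_succ (ih v hr)

theorem groupIds_append (g : List (List (List Int))) (path : List (List Int)) (i : Int) :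
    (pvGroupIds (g ++ [path])).contains i =
      ((pvGroupIds g).contains i || decide (i ∈ path.map pvT0)) := by
  rw [Bool.eq_iff_iff]
  simp [pvGroupIds, PySem.Set.mem_ofList]

theorem pvFirstIdx_append (groups : List (List (List (List Int)))) (path : List (List Int)) (i : Int) :
    pvFirstIdx (groups ++ [[path]]) i =
      match pvFirstIdx groups i with
      | some v => some v
      | none => if i ∈ path.map pvT0 then some groups.length else none := by
  induction groups with
  | nil =>
    simp only [List.nil_append, pvFirstIdx, List.length_nil]
    have : (pvGroupIds [path]).contains i = decide (i ∈ path.map pvT0) := by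
      have := groupIds_append [] path i
      simp only [pvGroupIds, List.nil_append] at this
      exact this
    rw [this]
    by_cases h : i ∈ path.map pvT0 <;> simp [h]
  | cons g rest ih =>
    simp only [List.cons_append, pvFirstIdx, ih]
    split
    · rfl
    · cases hr : pvFirstIdx rest i with
      | none => simp only []; split <;> simp [List.length_cons]
      | some v => simp

theorem pvFirstIdx_modify (groups : List (List (List (List Int)))) (path : List (List Int)) (g : Nat)
    (hg : g < groups.length) (i : Int) :
    pvFirstIdx (groups.modify g (· ++ [path])) i =
      if i ∈ path.map pvT0 then pvMinOpt (pvFirstIdx groups i) g else pvFirstIdx groups i := by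
  induction groups generalizing g with
  | nil => simp at hg
  | cons x rest ih =>
    cases g with
    | zero =>
      have hmod : (x :: rest).modify 0 (· ++ [path]) = (x ++ [path]) :: rest := rfl
      rw [hmod]
      by_cases hm : i ∈ path.map pvT0
      · rw [if_pos hm]
        have hc : i ∈ pvGroupIds (x ++ [path]) := by
          simp only [pvGroupIds, PySem.Set.mem_ofList, List.flatMap_append, List.mem_append]
          right; simpa using hm
        rw [show pvFirstIdx ((x ++ [path]) :: rest) i = some 0 from by simp [pvFirstIdx, hc]]
        cases pvFirstIdx (x :: rest) i <;> simp [pvMinOpt]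
      · rw [if_neg hm]
        simp only [pvFirstIdx, groupIds_append, hm, decide_false, Bool.or_false]
    | succ n =>
      have hn : n < rest.length := by simpa using hg
      have hmod : (x :: rest).modify (n + 1) (· ++ [path]) = x :: rest.modify n (· ++ [path]) := rfl
      rw [hmod]
      simp only [pvFirstIdx, ih n hn]
      by_cases hm : i ∈ path.map pvT0
      · rw [if_pos hm, if_pos hm]
        split
        · simp [pvMinOpt]
        · cases pvFirstIdx rest i <;> simp [pvMinOpt, Nat.succ_min_succ]
      · rw [if_neg hm, if_neg hm]

theorem pvUpd_get? (g : Nat) (d : PySem.Dict Int Nat) (j i : Int) :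
    (pvUpd g d j).get? i = if i = j then pvMinOpt (d.get? j) g else d.get? i := by
  rcases hd : d.get? j with _ | v <;> unfold pvUpd <;> rw [hd] <;> simp only []
  · rw [PySem.Dict.get?_insert]
    by_cases h : i = j
    · subst h; simp [pvMinOpt]
    · simp [h]
  · by_cases hgv : g < v
    · rw [if_pos hgv, PySem.Dict.get?_insert]
      by_cases h : i = j
      · subst h; simp only [pvMinOpt]
        rw [min_eq_right (le_of_lt hgv)]
      · simp [h]
    · rw [if_neg hgv]
      by_cases h : i = j
      · subst h; rw [if_pos rfl, hd]; simp only [pvMinOpt]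
        rw [min_eq_left (Nat.le_of_not_lt hgv)]
      · simp [h]

theorem pvDict_foldl_upd (g : Nat) (ids : List Int) (d : PySem.Dict Int Nat) (i : Int) :
    (ids.foldl (pvUpd g) d).get? i = if i ∈ ids then pvMinOpt (d.get? i) g else d.get? i := by
  induction ids generalizing d with
  | nil => simp
  | cons j js ih =>
    simp only [List.foldl_cons, ih, List.mem_cons]
    by_cases hij : i = j
    · subst hij
      rw [pvUpd_get?, if_pos rfl]
      by_cases hjs : i ∈ js
      · rw [if_pos hjs, if_pos (Or.inl rfl)]
        cases d.get? i <;> simp [pvMinOpt]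
      · rw [if_neg hjs, if_pos (Or.inl rfl)]
    · rw [pvUpd_get?, if_neg hij]
      by_cases hjs : i ∈ js
      · simp [hjs]
      · simp [hjs, hij]

theorem pvFoldlMin_le_init (t : List Nat) (x : Nat) : t.foldl min x ≤ x := by
  induction t generalizing x with
  | nil => simp
  | cons y ys ih => exact le_trans (ih (min x y)) (min_le_left x y)

theorem pvFoldlMin_le_mem (t : List Nat) (x y : Nat) (h : y ∈ t) : t.foldl min x ≤ y := by
  induction t generalizing x with
  | nil => simp at h
  | cons z zs ih =>
    rcases List.mem_cons.mp h with h0 | h0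
    · subst h0
      exact le_trans (pvFoldlMin_le_init zs (min x y)) (min_le_right x y)
    · exact ih (min x z) h0

theorem pvMin_zero (l : List Nat) (h : 0 ∈ l) :
    PySem.List.min? l (fun x => x) = some 0 := by
  cases l with
  | nil => simp at h
  | cons x t =>
    rw [PySem.List.min?_id_cons]
    congr 1
    rcases List.mem_cons.mp h with h0 | h0
    · subst h0; exact Nat.le_zero.mp (pvFoldlMin_le_init t 0)
    · exact Nat.le_zero.mp (pvFoldlMin_le_mem t x 0 h0)

theorem pvMin_map_succ (l : List Nat) :
    PySem.List.min? (l.map (· + 1)) (fun x => x) = (PySem.List.min? l (fun x => x)).map (· + 1) := by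
  cases l with
  | nil =>
    rw [(PySem.List.min?_eq_none_iff ([] : List Nat) (fun x => x)).mpr rfl]
    rfl
  | cons x t =>
    rw [List.map_cons, PySem.List.min?_id_cons, PySem.List.min?_id_cons]
    simp only [Option.map_some]
    congr 1
    induction t generalizing x with
    | nil => rfl
    | cons y ys ih => simp only [List.map_cons, List.foldl_cons, Nat.succ_min_succ, ih]

theorem pvFilterMap_succ (ids : List Int) (f : Int → Option Nat) (P : Int → Bool)
    (h : ∀ i ∈ ids, P i = false) :
    ids.filterMap (fun i => if P i then some 0 else (f i).map (· + 1))
      = (ids.filterMap f).map (· + 1) := by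
  induction ids with
  | nil => rfl
  | cons j js ih =>
    have hj := h j (List.mem_cons_self)
    rw [List.filterMap_cons, List.filterMap_cons, hj]
    simp only [Bool.false_eq_true, if_false]
    cases f j with
    | none => simpa using ih (fun i hi => h i (List.mem_cons_of_mem j hi))
    | some v => simp [ih (fun i hi => h i (List.mem_cons_of_mem j hi))]

theorem pvMin_filterMap (groups : List (List (List (List Int)))) (ids : List Int) :
    PySem.List.min? (ids.filterMap (pvFirstIdx groups)) (fun x => x) = pvInterIdx groups ids := by
  induction groups generalizing ids with
  | nil =>
    simp [pvFirstIdx, pvInterIdx, PySem.List.min?_eq_none_iff]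
  | cons g rest ih =>
    by_cases hany : ids.any (fun i => (pvGroupIds g).contains i) = true
    · obtain ⟨i, hi, hci⟩ := List.any_eq_true.mp hany
      have hmem : i ∈ pvGroupIds g := (PySem.Set.contains_iff _ _).mp hci
      rw [show pvInterIdx (g :: rest) ids = some 0 from by
        simp only [pvInterIdx, if_pos hany]]
      apply pvMin_zero
      apply List.mem_filterMap.mpr
      exact ⟨i, hi, by simp [pvFirstIdx, hmem]⟩
    · have hall : ∀ i ∈ ids, (pvGroupIds g).contains i = false := by
        intro i hi
        by_contra hc
        exact hany (List.any_eq_true.mpr ⟨i, hi, by simpa using hc⟩)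
      have : ids.filterMap (pvFirstIdx (g :: rest)) = (ids.filterMap (pvFirstIdx rest)).map (· + 1) := by
        rw [show (pvFirstIdx (g :: rest)) = (fun i => if (pvGroupIds g).contains i then some 0 else (pvFirstIdx rest i).map (· + 1)) from rfl]
        exact pvFilterMap_succ ids (pvFirstIdx rest) _ hall
      rw [this, pvMin_map_succ, ih]
      simp only [pvInterIdx]
      rw [if_neg (by simpa using hany)]

theorem pvStep_eq (acc : List (List (List (List Int)))) (d : PySem.Dict Int Nat)
    (path : List (List Int)) (hInv : pvInv acc d) :
    pvStepA acc path = (pvStepB (acc, d) path).1 ∧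
    pvInv (pvStepB (acc, d) path).1 (pvStepB (acc, d) path).2 := by
  have hfn : d.get? = pvFirstIdx acc := funext hInv
  have hmin : PySem.List.min? ((path.map pvT0).filterMap d.get?) (fun x => x)
      = pvInterIdx acc (path.map pvT0) := by
    rw [hfn, pvMin_filterMap]
  cases hI : pvInterIdx acc (path.map pvT0) with
  | some g =>
    have hg : g < acc.length := pvInterIdx_lt acc (path.map pvT0) g hI
    have hB : pvStepB (acc, d) path
        = (acc.modify g (· ++ [path]), (path.map pvT0).foldl (pvUpd g) d) := by
      simp only [pvStepB, hmin, hI]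
    constructor
    · rw [hB]
      unfold pvStepA
      rw [pvTryAdd_eq, hI]
      rfl
    · rw [hB]
      intro i
      rw [pvDict_foldl_upd, pvFirstIdx_modify acc path g hg i, hInv i]
  | none =>
    have hB : pvStepB (acc, d) path
        = (acc ++ [[path]], (path.map pvT0).foldl (pvUpd acc.length) d) := by
      simp only [pvStepB, hmin, hI]
    have hnone : ∀ i ∈ path.map pvT0, pvFirstIdx acc i = none := by
      have h0 : (path.map pvT0).filterMap (pvFirstIdx acc) = [] := by
        rw [← hfn, ← PySem.List.min?_eq_none_iff _ (fun x : Nat => x), hmin, hI]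
      exact fun i hi => List.forall_none_of_filterMap_eq_nil h0 i hi
    constructor
    · rw [hB]
      unfold pvStepA
      rw [pvTryAdd_eq, hI]
      rfl
    · rw [hB]
      intro i
      rw [pvDict_foldl_upd, pvFirstIdx_append, hInv i]
      by_cases hm : i ∈ path.map pvT0
      · rw [if_pos hm, hnone i hm]
        show pvMinOpt none acc.length = if i ∈ path.map pvT0 then some acc.length else none
        rw [if_pos hm]
        rfl
      · rw [if_neg hm]
        cases h : pvFirstIdx acc i
        · show (none : Option Nat) = if i ∈ path.map pvT0 then some acc.length else none
          rw [if_neg hm]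
        · rfl

theorem pvMain (paths : List (List (List Int))) (acc : List (List (List (List Int))))
    (d : PySem.Dict Int Nat) (hInv : pvInv acc d) :
    paths.foldl pvStepA acc = (paths.foldl pvStepB (acc, d)).1 := by
  induction paths generalizing acc d with
  | nil => rfl
  | cons p rest ih =>
    obtain ⟨h1, h2⟩ := pvStep_eq acc d p hInv
    simp only [List.foldl_cons, h1]
    exact ih _ _ h2

-- ===== VERDICT (by name: the statement is the Claim_ definition above) =====
theorem group_the_transistor_path_spec : Claim_equal_group_the_transistor_path := by
  intro paths _ _
  unfold Spec_group_the_transistor_path group_the_transistor_path group_the_transistor_path_alt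
  exact pvMain paths [] PySem.Dict.empty (fun i => by simp [pvFirstIdx, PySem.Dict.get?_empty])
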